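-- pv_equiv track=rewrite | github.com/guyfreund/BHA | playing_arround/excercises/list_subset.py | solution
-- ===== SOURCE A (Python) =====
-- def solution(S, L):
--     s_map, l_map = {}, {}
--
--     for item in S:
--         if item in s_map:
--             s_map[item] += 1
--         else:
--             s_map[item] = 1
--
--     for item in L:
--         if item in l_map:
--             l_map[item] += 1
--         else:
--             l_map[item] = 1
--
--     for k, v in s_map.items():
--         if k not in l_map:
--             return False
--         if l_map[k] < v:
--             return False
--
--     return True
-- ===== SOURCE B (Python) =====
-- def solution(S, L):
--     # Consume one occurrence of each required element from a working copy of L.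
--     rest = list(L)
--     for x in S:
--         try:
--             rest.remove(x)
--         except ValueError:
--             return False
--     return True
-- ===== Notes on version B (the rewrite author's own statement) =====
-- stated objective: simpler
-- what changed: Instead of building two full frequency maps and comparing them, B consumes one occurrence of each element of S from a working copy of L (list.remove), returning False on the first missing element.
import Mathlib
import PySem

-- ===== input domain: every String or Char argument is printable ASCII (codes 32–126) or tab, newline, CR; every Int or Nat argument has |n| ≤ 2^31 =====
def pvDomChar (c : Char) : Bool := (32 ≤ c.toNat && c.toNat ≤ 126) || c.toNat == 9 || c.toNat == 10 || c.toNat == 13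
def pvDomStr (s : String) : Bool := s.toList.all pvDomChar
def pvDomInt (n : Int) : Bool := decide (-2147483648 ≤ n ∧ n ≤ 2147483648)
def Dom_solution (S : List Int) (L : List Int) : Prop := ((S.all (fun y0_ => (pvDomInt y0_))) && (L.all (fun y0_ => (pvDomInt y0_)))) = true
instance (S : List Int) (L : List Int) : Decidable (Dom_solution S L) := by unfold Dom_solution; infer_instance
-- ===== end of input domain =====

-- B replaces A's two frequency maps with a single consuming pass (remove one
-- occurrence of each element of S from a copy of L); objective: simpler.

-- ===== PORT A =====
-- the first two loops of A: build a frequency map of the list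
def buildMap (xs : List Int) : PySem.Dict Int Int :=
  xs.foldl (fun m item =>
    if m.contains item then m.insert item (m.getD item 0 + 1) else m.insert item 1)
    PySem.Dict.empty

-- the third loop of A: iterate over s_map.items() with early return False
def checkLoop (lm : PySem.Dict Int Int) : List (Int × Int) → Bool
  | [] => true
  | (k, v) :: rest =>
    if lm.contains k = false then false
    else if lm.getD k 0 < v then false
    else checkLoop lm rest

def solution (S : List Int) (L : List Int) : Bool :=
  checkLoop (buildMap L) (buildMap S).items

-- ===== PORT B =====
-- B's loop: remove one occurrence of each x in S from the working copy of L
def removeLoop : List Int → List Int → Bool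
  | [], _ => true
  | x :: xs, rest =>
    match PySem.List.remove? rest x with
    | none => false
    | some rest' => removeLoop xs rest'

def solution_alt (S : List Int) (L : List Int) : Bool :=
  removeLoop S L

-- ===== PRECONDITION & SPEC =====
def Spec_solution (S : List Int) (L : List Int) (out : Bool) : Prop := out = solution_alt S L
instance (S : List Int) (L : List Int) (out : Bool) : Decidable (Spec_solution S L out) := by unfold Spec_solution; infer_instance

-- ===== CLAIM (what is proved, stated in full; the proofs are below) =====
def Claim_equal_solution : Prop := ∀ (S : List Int) (L : List Int), Dom_solution S L → Spec_solution S L (solution S L)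

-- ===== LEMMAS AND PROOFS =====

theorem buildMap_eq_counter (xs : List Int) : buildMap xs = PySem.Dict.counter xs := by
  rw [← PySem.Dict.foldl_insert_getD_add_one_eq_counter]
  unfold buildMap
  generalize PySem.Dict.empty = d
  induction xs generalizing d with
  | nil => rfl
  | cons x xs ih =>
    simp only [List.foldl_cons]
    rw [show (if PySem.Dict.contains d x then d.insert x (d.getD x 0 + 1) else d.insert x 1)
          = d.insert x (d.getD x 0 + 1) from ?_, ih]
    by_cases h : PySem.Dict.contains d x
    · simp [h]
    · simp only [Bool.not_eq_true] at h
      rw [PySem.Dict.getD_of_not_contains d 0 h]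
      simp [h]

theorem checkLoop_counter (S L : List Int) (ks : List Int) (hks : ∀ k ∈ ks, k ∈ S) :
    checkLoop (PySem.Dict.counter L) (ks.map (fun k => (k, (S.count k : Int)))) = true
      ↔ ∀ k ∈ ks, S.count k ≤ L.count k := by
  induction ks with
  | nil => simp [checkLoop]
  | cons k ks ih =>
    have hkS : k ∈ S := hks k (by simp)
    have hSpos : 0 < S.count k := List.count_pos_iff.mpr hkS
    have hrec := ih (fun a ha => hks a (by simp [ha]))
    simp only [List.map_cons, checkLoop, PySem.Dict.contains_counter, PySem.Dict.getD_counter]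
    by_cases hkL : k ∈ L
    · have hc : L.contains k = true := by simpa using hkL
      rw [hc]
      by_cases hlt : (L.count k : Int) < (S.count k : Int)
      · rw [if_neg (by simp), if_pos hlt]
        constructor
        · intro h; exact absurd h (by simp)
        · intro h; exact absurd (h k (by simp)) (by omega)
      · rw [if_neg (by simp), if_neg hlt, hrec]
        constructor
        · intro h a ha
          rcases List.mem_cons.mp ha with rfl | ha
          · omega
          · exact h a ha
        · intro h a ha; exact h a (List.mem_cons_of_mem _ ha)
    · have hc : L.contains k = false := by simpa using hkL
      have hL0 : L.count k = 0 := List.count_eq_zero.mpr hkL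
      rw [hc, if_pos rfl]
      constructor
      · intro h; exact absurd h (by simp)
      · intro h; exact absurd (h k (by simp)) (by omega)

theorem solution_iff (S L : List Int) :
    solution S L = true ↔ ∀ k ∈ S, S.count k ≤ L.count k := by
  unfold solution
  rw [buildMap_eq_counter, buildMap_eq_counter, PySem.Dict.items_counter]
  rw [checkLoop_counter S L (PySem.Set.ofList S)
      (fun k hk => (PySem.Set.mem_ofList _ _).mp hk)]
  constructor
  · intro h k hk; exact h k ((PySem.Set.mem_ofList _ _).mpr hk)
  · intro h k hk; exact h k ((PySem.Set.mem_ofList _ _).mp hk)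

theorem cons_erase_count_iff (x : Int) (xs L : List Int) (hxL : x ∈ L) :
    (∀ k ∈ x :: xs, (x :: xs).count k ≤ L.count k)
      ↔ (∀ k ∈ xs, xs.count k ≤ (L.erase x).count k) := by
  have hLpos : 0 < L.count x := List.count_pos_iff.mpr hxL
  have hce : List.count x (L.erase x) = List.count x L - 1 := List.count_erase_self
  constructor
  · intro h k hk
    have hc := h k (List.mem_cons_of_mem _ hk)
    by_cases hkx : k = x
    · subst hkx
      have h1 : List.count k (k :: xs) = List.count k xs + 1 := by simp
      omega
    · have h1 : List.count k (x :: xs) = List.count k xs := by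
        simp [show ¬ x = k from fun hh => hkx hh.symm]
      have h2 : List.count k (L.erase x) = List.count k L := List.count_erase_of_ne hkx
      omega
  · intro h k hk
    by_cases hkx : k = x
    · subst hkx
      have h1 : List.count k (k :: xs) = List.count k xs + 1 := by simp
      by_cases hkxs : k ∈ xs
      · have h2 := h k hkxs
        omega
      · have h0 : List.count k xs = 0 := List.count_eq_zero.mpr hkxs
        omega
    · have hk' : k ∈ xs := by
        rcases List.mem_cons.mp hk with rfl | hk'
        · exact absurd rfl hkx
        · exact hk'
      have h1 : List.count k (x :: xs) = List.count k xs := by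
        simp [show ¬ x = k from fun hh => hkx hh.symm]
      have h2 : List.count k (L.erase x) = List.count k L := List.count_erase_of_ne hkx
      have := h k hk'
      omega

theorem removeLoop_iff (S : List Int) : ∀ (L : List Int),
    removeLoop S L = true ↔ ∀ k ∈ S, S.count k ≤ L.count k := by
  induction S with
  | nil => intro L; simp [removeLoop]
  | cons x xs ih =>
    intro L
    simp only [removeLoop]
    by_cases hxL : x ∈ L
    · rw [PySem.List.remove?_eq_some_erase _ _ hxL]
      simp only [ih (L.erase x)]
      exact (cons_erase_count_iff x xs L hxL).symm
    · rw [(PySem.List.remove?_eq_none_iff _ _).mpr hxL]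
      have hL0 : L.count x = 0 := List.count_eq_zero.mpr hxL
      constructor
      · intro h; exact absurd h (by simp)
      · intro h
        have := h x (by simp)
        have hc : List.count x (x :: xs) = List.count x xs + 1 := by simp
        omega

-- ===== VERDICT (by name: the statement is the Claim_ definition above) =====
theorem solution_spec : Claim_equal_solution := by
  intro S L _
  unfold Spec_solution solution_alt
  rw [Bool.eq_iff_iff, solution_iff, removeLoop_iff]
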